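-- pv_equiv track=rewrite | github.com/epsalt/aoc2021 | day19.py | beacon_offsets
-- ===== SOURCE A (Python) =====
-- def beacon_offsets(scanner):
--     offsets = []
--     for a in scanner:
--         offset = set()
--         for b in scanner:
--             if a != b:
--                 offset.add((b[0] - a[0], b[1] - a[1], b[2] - a[2]))
--         offsets.append(offset)
--
--     return offsets
-- ===== SOURCE B (Python) =====
-- def beacon_offsets(scanner):
--     n = len(scanner)
--     offsets = [set() for _ in scanner]
--     for i in range(n):
--         a = scanner[i]
--         for j in range(i + 1, n):
--             b = scanner[j]
--             if a != b:
--                 offsets[i].add((b[0] - a[0], b[1] - a[1], b[2] - a[2]))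
--                 offsets[j].add((a[0] - b[0], a[1] - b[1], a[2] - b[2]))
--     return offsets
-- ===== Notes on version B (the rewrite author's own statement) =====
-- stated objective: alternative
-- what changed: A scans all n*n ordered pairs rebuilding each offset set independently; B pre-allocates one set per beacon and makes a single pass over unordered index pairs (i, j>i), adding each difference to offsets[i] and its negation to offsets[j], visiting each pair once.
import Mathlib
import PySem

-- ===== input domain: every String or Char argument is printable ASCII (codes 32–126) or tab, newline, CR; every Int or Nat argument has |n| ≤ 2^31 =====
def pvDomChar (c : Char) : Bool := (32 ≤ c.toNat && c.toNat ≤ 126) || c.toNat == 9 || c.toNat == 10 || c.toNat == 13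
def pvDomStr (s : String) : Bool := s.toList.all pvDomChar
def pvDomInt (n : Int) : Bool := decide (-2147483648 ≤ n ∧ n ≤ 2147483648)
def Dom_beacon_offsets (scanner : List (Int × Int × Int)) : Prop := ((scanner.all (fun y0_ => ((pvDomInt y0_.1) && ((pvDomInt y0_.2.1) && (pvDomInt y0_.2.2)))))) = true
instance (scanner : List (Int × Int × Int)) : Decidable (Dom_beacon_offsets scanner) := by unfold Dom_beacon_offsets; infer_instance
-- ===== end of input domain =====

-- B replaces A's full n×n scan (every ordered pair) by one pass over unordered index pairs (i, j > i),
-- adding each difference to offsets[i] and its negation to offsets[j]; objective: alternative (same asymptotic cost).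

-- ===== PORT A =====
-- the offset tuple (b[0]-a[0], b[1]-a[1], b[2]-a[2]) both Pythons build
def pvDiff (a b : Int × Int × Int) : Int × Int × Int :=
  (b.1 - a.1, b.2.1 - a.2.1, b.2.2 - a.2.2)

def beacon_offsets (scanner : List (Int × Int × Int)) : List (List (Int × Int × Int)) :=
  scanner.foldl
    (fun offsets a =>
      offsets ++ [scanner.foldl
        (fun offset b => if a ≠ b then PySem.Set.add offset (pvDiff a b) else offset)
        PySem.Set.empty])
    []

-- ===== PORT B =====
-- body of Source B's inner loop (j runs over range(i+1, n))
def pvInnerBody (scanner : List (Int × Int × Int)) (a : Int × Int × Int) (i : Int)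
    (offs : List (List (Int × Int × Int))) (j : Int) : List (List (Int × Int × Int)) :=
  let b := PySem.List.pyGetD scanner j (0, 0, 0)
  if a ≠ b then
    (offs.modify i.toNat (fun s => PySem.Set.add s (pvDiff a b))).modify j.toNat
      (fun s => PySem.Set.add s (pvDiff b a))
  else offs

-- body of Source B's outer loop (i runs over range(n)); indices are in range, so scanner[i] is pyGetD
def pvOuterBody (scanner : List (Int × Int × Int))
    (offs : List (List (Int × Int × Int))) (i : Int) : List (List (Int × Int × Int)) :=
  let a := PySem.List.pyGetD scanner i (0, 0, 0)
  (PySem.List.pyRange (i + 1) (scanner.length : Int) 1).foldl (pvInnerBody scanner a i) offs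

def beacon_offsets_alt (scanner : List (Int × Int × Int)) : List (List (Int × Int × Int)) :=
  (PySem.List.pyRange 0 (scanner.length : Int) 1).foldl (pvOuterBody scanner)
    (scanner.map (fun _ => PySem.Set.empty))

-- ===== PRECONDITION & SPEC =====
def Spec_beacon_offsets (scanner : List (Int × Int × Int)) (out : List (List (Int × Int × Int))) : Prop := out = beacon_offsets_alt scanner
instance (scanner : List (Int × Int × Int)) (out : List (List (Int × Int × Int))) : Decidable (Spec_beacon_offsets scanner out) := by unfold Spec_beacon_offsets; infer_instance

-- ===== CLAIM (what is proved, stated in full; the proofs are below) =====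
def Claim_equal_beacon_offsets : Prop := ∀ (scanner : List (Int × Int × Int)), Dom_beacon_offsets scanner → Spec_beacon_offsets scanner (beacon_offsets scanner)

-- ===== LEMMAS AND PROOFS =====

-- one step of A's inner fold
def pvStep (a : Int × Int × Int) (s : List (Int × Int × Int)) (b : Int × Int × Int) :
    List (Int × Int × Int) :=
  if a ≠ b then PySem.Set.add s (pvDiff a b) else s

-- A's row for index m, restricted to the first t beacons
def pvRow (scanner : List (Int × Int × Int)) (m t : Nat) : List (Int × Int × Int) :=
  (scanner.take t).foldl (pvStep (scanner.getD m (0, 0, 0))) []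

-- B's partially built row for the current outer index i, after inner indices up to t (index i omitted)
def pvQrow (scanner : List (Int × Int × Int)) (i t : Nat) : List (Int × Int × Int) :=
  ((scanner.take i ++ (scanner.drop (i + 1)).take (t - (i + 1))).foldl
    (pvStep (scanner.getD i (0, 0, 0))) [])

-- B's whole state, outer loop at i, inner loop at t
def pvShape (scanner : List (Int × Int × Int)) (i t : Nat) : List (List (Int × Int × Int)) :=
  (List.range scanner.length).map (fun m =>
    if m < i then pvRow scanner m scanner.length
    else if m = i then pvQrow scanner i t
    else if m < t then pvRow scanner m (i + 1)
    else pvRow scanner m i)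

theorem pv_length_pvShape (scanner : List (Int × Int × Int)) (i t : Nat) :
    (pvShape scanner i t).length = scanner.length := by
  simp [pvShape]

theorem pv_getElem_pvShape (scanner : List (Int × Int × Int)) (i t m : Nat)
    (hm : m < (pvShape scanner i t).length) :
    (pvShape scanner i t)[m] =
      (if m < i then pvRow scanner m scanner.length
       else if m = i then pvQrow scanner i t
       else if m < t then pvRow scanner m (i + 1)
       else pvRow scanner m i) := by
  simp [pvShape]

theorem pvStep_self (a : Int × Int × Int) (s : List (Int × Int × Int)) : pvStep a s a = s := by
  simp [pvStep]

theorem pvStep_ne (a : Int × Int × Int) (s : List (Int × Int × Int)) (b : Int × Int × Int)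
    (h : a ≠ b) : pvStep a s b = PySem.Set.add s (pvDiff a b) := by
  simp [pvStep, h]

theorem pv_row_succ (scanner : List (Int × Int × Int)) (m t : Nat) (ht : t < scanner.length) :
    pvRow scanner m (t + 1) = pvStep (scanner.getD m (0, 0, 0)) (pvRow scanner m t) (scanner.getD t (0, 0, 0)) := by
  unfold pvRow
  rw [List.take_add_one, List.getElem?_eq_getElem ht, List.getD_eq_getElem scanner (0,0,0) ht]
  simp only [Option.toList_some, List.foldl_append, List.foldl_cons, List.foldl_nil]

theorem pv_qrow_succ (scanner : List (Int × Int × Int)) (i t : Nat) (hit : i < t)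
    (ht : t < scanner.length) :
    pvQrow scanner i (t + 1) =
      pvStep (scanner.getD i (0, 0, 0)) (pvQrow scanner i t) (scanner.getD t (0, 0, 0)) := by
  unfold pvQrow
  have h1 : t + 1 - (i + 1) = (t - (i + 1)) + 1 := by omega
  rw [h1, List.take_add_one, List.getElem?_drop]
  have h2 : i + 1 + (t - (i + 1)) = t := by omega
  rw [h2, List.getElem?_eq_getElem ht, List.getD_eq_getElem scanner (0,0,0) ht]
  simp only [Option.toList_some, ← List.append_assoc, List.foldl_append, List.foldl_cons,
    List.foldl_nil]

theorem pv_qrow_self (scanner : List (Int × Int × Int)) (i : Nat) :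
    pvQrow scanner i i = pvRow scanner i i := by
  unfold pvQrow pvRow
  rw [show i - (i + 1) = 0 from by omega]
  simp

theorem pv_qrow_start (scanner : List (Int × Int × Int)) (i : Nat) :
    pvQrow scanner i (i + 1) = pvQrow scanner i i := by
  unfold pvQrow
  rw [show i + 1 - (i + 1) = 0 from by omega, show i - (i + 1) = 0 from by omega]

theorem pv_qrow_full (scanner : List (Int × Int × Int)) (i : Nat) (hi : i < scanner.length) :
    pvQrow scanner i scanner.length = pvRow scanner i scanner.length := by
  have hdec : scanner = List.take i scanner ++ scanner.getD i (0, 0, 0) :: List.drop (i + 1) scanner := by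
    conv_lhs => rw [← List.take_append_drop i scanner]
    rw [List.drop_eq_getElem_cons hi, List.getD_eq_getElem scanner (0,0,0) hi]
  unfold pvQrow pvRow
  have ha : (List.drop (i + 1) scanner).take (scanner.length - (i + 1)) = List.drop (i + 1) scanner :=
    List.take_of_length_le (by simp)
  have hb : scanner.take scanner.length = scanner := List.take_length
  rw [ha, hb]
  generalize hg : scanner.getD i (0, 0, 0) = a at hdec ⊢
  conv_rhs => rw [hdec]
  rw [List.foldl_append, List.foldl_append, List.foldl_cons]
  simp [pvStep]

theorem pv_shape_start (scanner : List (Int × Int × Int)) (i : Nat) :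
    pvShape scanner i i = pvShape scanner i (i + 1) := by
  unfold pvShape
  apply List.map_congr_left
  intro m hm
  by_cases h1 : m < i
  · simp [h1]
  by_cases h2 : m = i
  · simp [h2, pv_qrow_start]
  · have h3 : ¬ m < i + 1 := by omega
    have h4 : ¬ m < i := h1
    simp [h1, h2, h3]

theorem pv_shape_shift (scanner : List (Int × Int × Int)) (i : Nat) (hi : i < scanner.length) :
    pvShape scanner i scanner.length = pvShape scanner (i + 1) (i + 1) := by
  unfold pvShape
  apply List.map_congr_left
  intro m hm
  rw [List.mem_range] at hm
  by_cases h1 : m < i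
  · simp [h1, show m < i + 1 from by omega]
  by_cases h2 : m = i
  · subst h2
    simp [show m < m + 1 from by omega, pv_qrow_full scanner m hi]
  by_cases h3 : m = i + 1
  · subst h3
    simp [h1, hm, pv_qrow_self]
  · have h4 : ¬ m < i + 1 := by omega
    simp [h1, h2, h3, h4, hm]

theorem pv_inner (scanner : List (Int × Int × Int)) (i t : Nat) (hi : i < scanner.length)
    (hit : i < t) (htn : t ≤ scanner.length) :
    (PySem.List.pyRange (t : Int) (scanner.length : Int) 1).foldl
        (pvInnerBody scanner (scanner.getD i (0, 0, 0)) (i : Int)) (pvShape scanner i t)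
      = pvShape scanner i scanner.length := by
  by_cases h : t < scanner.length
  · rw [PySem.List.pyRange_one_cons (by exact_mod_cast h), List.foldl_cons]
    have hb : pvInnerBody scanner (scanner.getD i (0, 0, 0)) (i : Int) (pvShape scanner i t) (t : Int)
        = pvShape scanner i (t + 1) := by
      unfold pvInnerBody
      rw [PySem.List.pyGetD_natCast]
      by_cases hab : scanner.getD i (0, 0, 0) = scanner.getD t (0, 0, 0)
      · rw [if_neg (by simpa using hab)]
        -- no insertion: both rows absorb the equal element
        unfold pvShape
        apply List.map_congr_left
        intro m hm
        rw [List.mem_range] at hm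
        by_cases h1 : m < i
        · simp [h1]
        by_cases h2 : m = i
        · subst h2
          rw [if_neg h1, if_neg h1, if_pos rfl, if_pos rfl]
          rw [pv_qrow_succ scanner m t hit h, hab, pvStep_self]
        by_cases h3 : m = t
        · subst h3
          rw [if_neg h1, if_neg h1, if_neg h2, if_neg h2,
            if_neg (lt_irrefl m), if_pos (by omega : m < m + 1)]
          rw [pv_row_succ scanner m i (by omega), hab, pvStep_self]
        · by_cases h5 : m < t
          · rw [if_neg h1, if_neg h1, if_neg h2, if_neg h2, if_pos h5,
              if_pos (by omega : m < t + 1)]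
          · rw [if_neg h1, if_neg h1, if_neg h2, if_neg h2, if_neg h5,
              if_neg (by omega : ¬ m < t + 1)]
      · rw [if_pos (by simpa using hab)]
        apply List.ext_getElem
        · simp [pv_length_pvShape]
        intro m hm1 hm2
        have hmn : m < scanner.length := by
          simpa [pv_length_pvShape] using hm2
        rw [List.getElem_modify, List.getElem_modify]
        rw [pv_getElem_pvShape scanner i t m (by simpa [pv_length_pvShape] using hmn)]
        rw [pv_getElem_pvShape scanner i (t + 1) m (by simpa [pv_length_pvShape] using hmn)]
        rw [Int.toNat_natCast, Int.toNat_natCast]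
        by_cases h3 : t = m
        · subst h3
          rw [if_pos rfl, if_neg (by omega : ¬ i = t), if_neg (by omega : ¬ t < i),
            if_neg (by omega : ¬ t < i), if_neg (by omega : ¬ t = i), if_neg (by omega : ¬ t = i),
            if_neg (lt_irrefl t), if_pos (by omega : t < t + 1)]
          rw [pv_row_succ scanner t i (by omega),
            pvStep_ne _ _ _ (fun hh => hab hh.symm)]
        · rw [if_neg h3]
          by_cases h4 : i = m
          · subst h4
            rw [if_pos rfl, if_neg (lt_irrefl i), if_neg (lt_irrefl i), if_pos rfl, if_pos rfl]
            rw [pv_qrow_succ scanner i t hit h, pvStep_ne _ _ _ hab]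
          · rw [if_neg h4]
            by_cases h1 : m < i
            · rw [if_pos h1, if_pos h1]
            by_cases h2 : m = i
            · exact absurd h2.symm h4
            · by_cases h5 : m < t
              · rw [if_neg h1, if_neg h1, if_neg h2, if_neg h2, if_pos h5,
                  if_pos (by omega : m < t + 1)]
              · rw [if_neg h1, if_neg h1, if_neg h2, if_neg h2, if_neg h5,
                  if_neg (by omega : ¬ m < t + 1)]
    rw [hb, show ((t : Int) + 1) = (((t + 1 : Nat)) : Int) from by push_cast; ring]
    exact pv_inner scanner i (t + 1) hi (by omega) (by omega)
  · have ht : t = scanner.length := by omega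
    subst ht
    rw [PySem.List.pyRange_one_eq_nil (le_refl _)]
    simp
termination_by scanner.length - t

theorem pv_outer (scanner : List (Int × Int × Int)) (i : Nat) (hin : i ≤ scanner.length) :
    (PySem.List.pyRange (i : Int) (scanner.length : Int) 1).foldl (pvOuterBody scanner)
        (pvShape scanner i i)
      = pvShape scanner scanner.length scanner.length := by
  by_cases h : i < scanner.length
  · rw [PySem.List.pyRange_one_cons (by exact_mod_cast h), List.foldl_cons]
    have hb : pvOuterBody scanner (pvShape scanner i i) (i : Int) = pvShape scanner (i + 1) (i + 1) := by
      unfold pvOuterBody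
      rw [PySem.List.pyGetD_natCast]
      rw [show ((i : Int) + 1) = (((i + 1 : Nat)) : Int) from by push_cast; ring]
      rw [pv_shape_start scanner i]
      rw [pv_inner scanner i (i + 1) h (by omega) (by omega)]
      exact pv_shape_shift scanner i h
    rw [hb, show ((i : Int) + 1) = (((i + 1 : Nat)) : Int) from by push_cast; ring]
    exact pv_outer scanner (i + 1) (by omega)
  · have hi : i = scanner.length := by omega
    subst hi
    rw [PySem.List.pyRange_one_eq_nil (le_refl _)]
    simp
termination_by scanner.length - i

-- a loop appending one element per iteration is a map
theorem pv_foldl_append_map {α β : Type} (f : α → β) :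
    ∀ (l : List α) (init : List β),
      l.foldl (fun acc a => acc ++ [f a]) init = init ++ l.map f := by
  intro l
  induction l with
  | nil => simp
  | cons x xs ih => intro init; simp [ih]

theorem pv_alt_eq_shape (scanner : List (Int × Int × Int)) :
    beacon_offsets_alt scanner = pvShape scanner scanner.length scanner.length := by
  unfold beacon_offsets_alt
  have hinit : scanner.map (fun _ => (PySem.Set.empty : PySem.Set (Int × Int × Int)))
      = pvShape scanner 0 0 := by
    apply List.ext_getElem
    · simp [pv_length_pvShape]
    intro m hm1 hm2
    have hmn : m < scanner.length := by simpa using hm1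
    rw [List.getElem_map, pv_getElem_pvShape scanner 0 0 m (by simp [pv_length_pvShape]; exact hmn)]
    by_cases h0 : m = 0
    · subst h0
      simp [pvQrow, PySem.Set.empty]
    · simp [h0, pvRow, PySem.Set.empty]
  rw [hinit, show (0 : Int) = ((0 : Nat) : Int) from rfl]
  exact pv_outer scanner 0 (by omega)

theorem pv_a_eq_shape (scanner : List (Int × Int × Int)) :
    beacon_offsets scanner = pvShape scanner scanner.length scanner.length := by
  unfold beacon_offsets
  rw [pv_foldl_append_map]
  apply List.ext_getElem
  · simp [pv_length_pvShape]
  intro m hm1 hm2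
  have hmn : m < scanner.length := by simpa using hm1
  simp only [List.nil_append, List.getElem_map]
  rw [pv_getElem_pvShape scanner scanner.length scanner.length m
      (by simpa [pv_length_pvShape] using hmn)]
  rw [if_pos hmn]
  unfold pvRow
  have hb : scanner.take scanner.length = scanner := List.take_length
  rw [hb, List.getD_eq_getElem scanner (0,0,0) hmn]
  rfl

-- ===== VERDICT (by name: the statement is the Claim_ definition above) =====
theorem beacon_offsets_spec : Claim_equal_beacon_offsets := by
  intro scanner _
  unfold Spec_beacon_offsets
  rw [pv_a_eq_shape, pv_alt_eq_shape]
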